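-- pv_equiv track=rewrite | github.com/n0reflecti0n/Spellcheck | main.py | generate_kGramm_index
-- ===== SOURCE A (Python) =====
-- def tri_grams(word):
--     word = "${}$".format(word)
--     w_l = len(word) + 1
--     return [word[i:i + 3] for i in range(0, max(w_l - 3, 1))]
--
-- def generate_kGramm_index(dictionary):
--     kgram_index = {}
--     for i, word in enumerate(dictionary):
--         splitted = tri_grams(word)
--         for kgram in splitted:
--             kgram_in_index = kgram_index.get(kgram)
--             if kgram_in_index is not None:
--                 kgram_in_index.append(i)
--             else:
--                 kgram_index[kgram] = [i]
--     return kgram_index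
-- ===== SOURCE B (Python) =====
-- def tri_grams(word):
--     padded = "$" + word + "$"
--     return [padded[i:i + 3] for i in range(max(len(word), 1))]
--
-- def generate_kGramm_index(dictionary):
--     pairs = [(g, i) for i, w in enumerate(dictionary) for g in tri_grams(w)]
--     keys = list(dict.fromkeys(g for g, _ in pairs))
--     return {k: [i for g, i in pairs if g == k] for k in keys}
-- ===== Notes on version B (the rewrite author's own statement) =====
-- stated objective: alternative
-- what changed: Replaces A's incremental dict-of-lists accumulation (get, then append or insert per trigram) by a flatten / ordered-dedup (dict.fromkeys) / group-by-scan construction over a flat (kgram, index) pair list.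
import Mathlib
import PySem

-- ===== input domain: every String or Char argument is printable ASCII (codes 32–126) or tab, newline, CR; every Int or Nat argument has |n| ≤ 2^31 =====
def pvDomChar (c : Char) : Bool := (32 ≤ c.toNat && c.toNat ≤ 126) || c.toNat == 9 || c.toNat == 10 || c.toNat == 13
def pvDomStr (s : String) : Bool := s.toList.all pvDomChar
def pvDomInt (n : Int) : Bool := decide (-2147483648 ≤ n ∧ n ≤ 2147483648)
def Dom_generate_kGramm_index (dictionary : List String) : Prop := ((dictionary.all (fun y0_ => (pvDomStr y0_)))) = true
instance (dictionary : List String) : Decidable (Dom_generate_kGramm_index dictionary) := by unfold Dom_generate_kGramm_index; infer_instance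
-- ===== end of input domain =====

-- B replaces A's incremental dict-of-lists accumulation by a flatten / ordered-dedup / group-by-scan
-- construction (objective: alternative, not faster). Same return value; A mutates nothing observable.

-- ===== PORT A =====
-- tri_grams: word = "${}$".format(word); w_l = len(word) + 1; [word[i:i+3] for i in range(0, max(w_l-3, 1))]
def tri_grams (word : String) : List String :=
  let w : List Char := '$' :: word.toList ++ ['$']
  let w_l : Int := (w.length : Int) + 1
  (PySem.List.pyRange 0 (max (w_l - 3) 1) 1).map
    (fun i => String.ofList (PySem.List.slice w (some i) (some (i + 3))))

def generate_kGramm_index (dictionary : List String) : List (String × List Int) :=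
  ((PySem.List.enumerate dictionary).foldl
    (fun kgram_index iw =>
      (tri_grams iw.2).foldl
        (fun kgram_index kgram =>
          match kgram_index.get? kgram with
          | some l => kgram_index.insert kgram (l ++ [iw.1])  -- kgram_in_index.append(i): value list extended in place
          | none   => kgram_index.insert kgram [iw.1])
        kgram_index)
    PySem.Dict.empty).items

-- ===== PORT B =====
-- padded = "$" + word + "$"; [padded[i:i+3] for i in range(max(len(word), 1))]
def tri_grams_b (word : String) : List String :=
  let padded : List Char := '$' :: word.toList ++ ['$']
  (PySem.List.pyRange 0 (max (PySem.Str.len word) 1) 1).map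
    (fun i => String.ofList (PySem.List.slice padded (some i) (some (i + 3))))

def generate_kGramm_index_alt (dictionary : List String) : List (String × List Int) :=
  let pairs : List (String × Int) :=
    (PySem.List.enumerate dictionary).flatMap (fun iw => (tri_grams_b iw.2).map (fun g => (g, iw.1)))
  let keys : List String := PySem.List.dedup (pairs.map Prod.fst)  -- list(dict.fromkeys(...))
  keys.map (fun k => (k, (pairs.filter (fun p => p.1 == k)).map (·.2)))

-- ===== PRECONDITION & SPEC =====
def Spec_generate_kGramm_index (dictionary : List String) (out : List (String × List Int)) : Prop := out = generate_kGramm_index_alt dictionary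
instance (dictionary : List String) (out : List (String × List Int)) : Decidable (Spec_generate_kGramm_index dictionary out) := by unfold Spec_generate_kGramm_index; infer_instance

-- ===== CLAIM (what is proved, stated in full; the proofs are below) =====
def Claim_equal_generate_kGramm_index : Prop := ∀ (dictionary : List String), Dom_generate_kGramm_index dictionary → Spec_generate_kGramm_index dictionary (generate_kGramm_index dictionary)

-- ===== LEMMAS AND PROOFS =====

-- the two trigram helpers compute the same list: w_l - 3 = (len word + 2) + 1 - 3 = len word
theorem tri_grams_eq (word : String) : tri_grams word = tri_grams_b word := by
  have h : ((('$' :: word.toList ++ ['$']).length : Int) + 1) - 3 = PySem.Str.len word := by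
    simp [PySem.Str.len]; omega
  show (PySem.List.pyRange 0 (max (((('$' :: word.toList ++ ['$']).length : Int) + 1) - 3) 1) 1).map
      (fun i => String.ofList (PySem.List.slice ('$' :: word.toList ++ ['$']) (some i) (some (i + 3))))
    = (PySem.List.pyRange 0 (max (PySem.Str.len word) 1) 1).map
      (fun i => String.ofList (PySem.List.slice ('$' :: word.toList ++ ['$']) (some i) (some (i + 3))))
  rw [h]

-- A's get?-branch step is exactly Python's d[k] = d.get(k, []) + [i], i.e. Dict.modify
theorem stepA_eq_modify (d : PySem.Dict String (List Int)) (g : String) (i : Int) :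
    (match d.get? g with
     | some l => d.insert g (l ++ [i])
     | none   => d.insert g [i]) = d.modify g [] (· ++ [i]) := by
  cases h : d.get? g with
  | some l =>
      simp [PySem.Dict.modify, PySem.Dict.getD_of_get?_eq_some d [] h]
  | none =>
      simp [PySem.Dict.modify, PySem.Dict.getD_of_get?_eq_none d [] h]

theorem generate_kGramm_index_spec : Claim_equal_generate_kGramm_index := by
  intro dictionary _
  show generate_kGramm_index dictionary = generate_kGramm_index_alt dictionary
  unfold generate_kGramm_index generate_kGramm_index_alt
  -- rewrite A's step to Dict.modify and its nested loop to a single fold over the flattened pair list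
  have hA :
      ((PySem.List.enumerate dictionary).foldl
        (fun kgram_index iw =>
          (tri_grams iw.2).foldl
            (fun kgram_index kgram =>
              match kgram_index.get? kgram with
              | some l => kgram_index.insert kgram (l ++ [iw.1])
              | none   => kgram_index.insert kgram [iw.1])
            kgram_index)
        PySem.Dict.empty)
      = ((PySem.List.enumerate dictionary).flatMap
          (fun iw => (tri_grams_b iw.2).map (fun g => (g, iw.1)))).foldl
          (fun d p => d.modify p.1 [] (· ++ [p.2])) PySem.Dict.empty := by
    rw [List.foldl_flatMap]
    apply PySem.List.foldl_congr_mem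
    intro d iw _
    rw [List.foldl_map, ← tri_grams_eq]
    apply PySem.List.foldl_congr_mem
    intro d' g _
    exact stepA_eq_modify d' g iw.1
  rw [hA]
  set pairs : List (String × Int) :=
    (PySem.List.enumerate dictionary).flatMap
      (fun iw => (tri_grams_b iw.2).map (fun g => (g, iw.1))) with hpairs
  have hnodup : ((pairs.foldl (fun d p => d.modify p.1 [] (· ++ [p.2])) PySem.Dict.empty).keys).Nodup := by
    exact PySem.Dict.nodup_keys_foldl_modify_key pairs Prod.fst [] (fun d p => (· ++ [p.2]))
      PySem.Dict.empty (by simp)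
  rw [PySem.Dict.items_eq_map_keys _ hnodup []]
  have hkeys : (pairs.foldl (fun d p => d.modify p.1 [] (· ++ [p.2])) PySem.Dict.empty).keys
      = PySem.List.dedup (pairs.map Prod.fst) := by
    rw [PySem.Dict.keys_foldl_modify_key pairs Prod.fst [] (fun d p => (· ++ [p.2])) PySem.Dict.empty]
    simp [PySem.Dict.keys_empty, PySem.Set.update, PySem.Set.ofList_eq_foldl]
  rw [hkeys]
  apply List.map_congr_left
  intro k _
  rw [PySem.Dict.getD_foldl_modify_append]
  simp [PySem.Dict.getD_empty]
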